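-- pv_equiv track=rewrite | github.com/gulnazaki/VariousUniversityProjects | cryptography/ntru.py | toTernary
-- ===== SOURCE A (Python) =====
-- def toTernary(n):
--     e = n // 3
--     q = n % 3
--     if n == 0:
--         return [0]
--     elif e == 0:
--         return [q]
--     else:
--         return toTernary(e) + [q]
-- ===== SOURCE B (Python) =====
-- def toTernary(n):
--     p = 1
--     while 3 * p <= n:
--         p *= 3
--     digits = []
--     while p > 0:
--         digits.append(n // p)
--         n -= (n // p) * p
--         p //= 3
--     return digits
-- ===== Notes on version B (the rewrite author's own statement) =====
-- stated objective: alternative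
-- what changed: Replaces A's recursion on n//3 with a two-loop most-significant-first extraction: first find the largest power of 3 not exceeding n, then extract each digit by division by that power, so digits are produced in output order with no recursion and no list concatenation.
import Mathlib
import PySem

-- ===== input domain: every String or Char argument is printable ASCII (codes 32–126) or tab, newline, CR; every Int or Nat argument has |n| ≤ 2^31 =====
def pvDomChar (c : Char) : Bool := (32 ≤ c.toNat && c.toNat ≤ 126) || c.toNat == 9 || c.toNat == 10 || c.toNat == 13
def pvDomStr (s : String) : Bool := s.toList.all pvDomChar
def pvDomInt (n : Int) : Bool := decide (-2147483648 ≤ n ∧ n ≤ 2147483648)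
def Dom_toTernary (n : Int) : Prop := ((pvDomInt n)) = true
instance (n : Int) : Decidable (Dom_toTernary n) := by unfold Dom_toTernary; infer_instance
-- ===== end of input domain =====

-- B replaces A's recursion on n//3 with an iterative most-significant-first
-- extraction: find the largest power of 3 not exceeding n, then peel digits by
-- dividing by shrinking powers; objective: alternative (no recursion, no ++).


-- ===== PORT A =====
-- Literal port of A's recursion (e = n // 3, q = n % 3); the fuel n.toNat + 1
-- only makes the recursion structural: it never runs out when 0 ≤ n (Pre_),
-- and on n < 0 Python recurses forever (excluded by Pre_).
def toTernaryGo : Nat → Int → List Int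
  | 0, _ => []
  | f + 1, n =>
    if n = 0 then [0]
    else if PySem.Int.floordiv n 3 = 0 then [PySem.Int.mod n 3]
    else toTernaryGo f (PySem.Int.floordiv n 3) ++ [PySem.Int.mod n 3]

def toTernary (n : Int) : List Int := toTernaryGo (n.toNat + 1) n

-- ===== PORT B =====
-- first loop of Source B: p = 1; while 3 * p <= n: p *= 3
def powGo : Nat → Int → Int → Int
  | 0, _, p => p
  | f + 1, n, p => if 3 * p ≤ n then powGo f n (3 * p) else p

-- second loop of Source B: while p > 0: append n // p; n -= (n // p) * p; p //= 3
def digGo : Nat → Int → Int → List Int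
  | 0, _, _ => []
  | f + 1, n, p =>
    if 0 < p then
      PySem.Int.floordiv n p ::
        digGo f (n - PySem.Int.floordiv n p * p) (PySem.Int.floordiv p 3)
    else []

def toTernary_alt (n : Int) : List Int :=
  digGo (n.toNat + 2) n (powGo (n.toNat + 1) n 1)

-- ===== PRECONDITION & SPEC =====
-- Pre_ excludes negative n, on which A raises RecursionError.
def Pre_toTernary (n : Int) : Prop := 0 ≤ n
instance (n : Int) : Decidable (Pre_toTernary n) := by unfold Pre_toTernary; infer_instance
def pvWitness_toTernary : Int := 7

def Spec_toTernary (n : Int) (out : List Int) : Prop := out = toTernary_alt n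
instance (n : Int) (out : List Int) : Decidable (Spec_toTernary n out) := by unfold Spec_toTernary; infer_instance

-- ===== CLAIM (what is proved, stated in full; the proofs are below) =====
def Claim_equal_toTernary : Prop := ∀ (n : Int), Dom_toTernary n → Pre_toTernary n → Spec_toTernary n (toTernary n)

-- ===== LEMMAS AND PROOFS =====

-- the power loop returns the largest power of 3 ≤ n (given enough fuel)
theorem powGo_spec : ∀ (f : Nat) (p n : Int), 0 < p → p ≤ n → n < p * 3 ^ f →
    ∃ k : Nat, powGo f n p = p * 3 ^ k ∧ p * 3 ^ k ≤ n ∧ n < p * 3 ^ (k + 1) := by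
  intro f
  induction f with
  | zero => intro p n hp hle hlt; simp [pow_zero] at hlt; omega
  | succ f ih =>
    intro p n hp hle hlt
    rw [powGo]
    by_cases h : 3 * p ≤ n
    · rw [if_pos h]
      obtain ⟨k, hk, hk1, hk2⟩ :=
        ih (3 * p) n (by omega) h (by rw [pow_succ] at hlt; linarith [hlt])
      refine ⟨k + 1, ?_, ?_, ?_⟩
      · rw [hk]; ring
      · calc p * 3 ^ (k + 1) = 3 * p * 3 ^ k := by ring
          _ ≤ n := hk1
      · calc n < 3 * p * 3 ^ (k + 1) := hk2
          _ = p * 3 ^ (k + 1 + 1) := by ring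
    · rw [if_neg h]
      exact ⟨0, by ring, by simpa using hle, by rw [pow_one]; omega⟩

-- one digit-extraction step when the power is exactly 1
theorem digGo_one (f : Nat) (n : Int) : digGo (f + 1) n 1 = [n] := by
  rw [digGo, if_pos (by norm_num : (0:Int) < 1)]
  have h1 : PySem.Int.floordiv n 1 = n := by
    rw [PySem.Int.floordiv_eq_ediv_of_pos (by norm_num)]; simp
  have h3 : PySem.Int.floordiv 1 3 = 0 := by decide
  rw [h1, h3]
  cases f <;> simp [digGo]

-- arithmetic: the middle digits of n below 3*m, divided by 3, are the digits of n/3 below m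
theorem mid_digit (n m : Int) (_hm : 0 < m) : n % (3 * m) / 3 = n / 3 % m := by
  have hq : n % (3 * m) = n + 3 * (-(m * (n / (3 * m)))) := by
    rw [Int.emod_def]; ring
  rw [hq, Int.add_mul_ediv_left n (-(m * (n / (3 * m)))) (by norm_num : (3:Int) ≠ 0)]
  rw [Int.emod_def (n / 3) m,
    Int.ediv_ediv_of_nonneg (show (0:Int) ≤ 3 by norm_num)]
  ring

-- peeling the top power of 3 commutes with splitting off the last digit
theorem digGo_step : ∀ (k : Nat), ∀ (f g : Nat) (n : Int), 0 ≤ n → k + 1 < f → k + 1 < g →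
    digGo f n (3 ^ (k + 1)) = digGo g (n / 3) (3 ^ k) ++ [n % 3] := by
  intro k
  induction k with
  | zero =>
    intro f g n _ hf hg
    obtain ⟨f, rfl⟩ : ∃ f', f = f' + 2 := ⟨f - 2, by omega⟩
    obtain ⟨g, rfl⟩ : ∃ g', g = g' + 2 := ⟨g - 2, by omega⟩
    rw [digGo, if_pos (by norm_num : (0:Int) < 3 ^ (0 + 1))]
    have hfd : PySem.Int.floordiv n (3 ^ (0 + 1)) = n / 3 := by
      rw [PySem.Int.floordiv_eq_ediv_of_pos (by norm_num)]; norm_num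
    have hp : PySem.Int.floordiv (3 ^ (0 + 1)) 3 = 1 := by decide
    rw [hfd, hp]
    have hrem : n - n / 3 * 3 ^ (0 + 1) = n % 3 := by
      rw [Int.emod_def]; ring
    rw [hrem, digGo_one, pow_zero, digGo_one]; rfl
  | succ k ih =>
    intro f g n hn hf hg
    obtain ⟨f, rfl⟩ : ∃ f', f = f' + 1 := ⟨f - 1, by omega⟩
    obtain ⟨g, rfl⟩ : ∃ g', g = g' + 1 := ⟨g - 1, by omega⟩
    have hpow : (0:Int) < 3 ^ (k + 1 + 1) := by positivity
    rw [digGo, if_pos hpow, digGo, if_pos (by positivity : (0:Int) < 3 ^ (k + 1))]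
    have hfd : PySem.Int.floordiv n (3 ^ (k + 1 + 1)) = n / 3 ^ (k + 1 + 1) := by
      rw [PySem.Int.floordiv_eq_ediv_of_pos hpow]
    have hfd2 : PySem.Int.floordiv (n / 3) (3 ^ (k + 1)) = n / 3 / 3 ^ (k + 1) := by
      rw [PySem.Int.floordiv_eq_ediv_of_pos (by positivity)]
    have hfd3 : PySem.Int.floordiv (3 ^ (k + 1 + 1)) 3 = 3 ^ (k + 1) := by
      rw [PySem.Int.floordiv_eq_ediv_of_pos (by norm_num)]
      rw [pow_succ, Int.mul_ediv_cancel _ (by norm_num : (3:Int) ≠ 0)]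
    have hfd4 : PySem.Int.floordiv (3 ^ (k + 1)) 3 = 3 ^ k := by
      rw [PySem.Int.floordiv_eq_ediv_of_pos (by norm_num)]
      rw [pow_succ, Int.mul_ediv_cancel _ (by norm_num : (3:Int) ≠ 0)]
    rw [hfd, hfd2, hfd3, hfd4]
    have hrem1 : n - n / 3 ^ (k + 1 + 1) * 3 ^ (k + 1 + 1) = n % 3 ^ (k + 1 + 1) := by
      rw [Int.emod_def]; ring
    have hrem2 : n / 3 - n / 3 / 3 ^ (k + 1) * 3 ^ (k + 1) = n / 3 % 3 ^ (k + 1) := by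
      rw [Int.emod_def]; ring
    rw [hrem1, hrem2]
    have hhead : n / 3 ^ (k + 1 + 1) = n / 3 / 3 ^ (k + 1) := by
      rw [Int.ediv_ediv_of_nonneg (show (0:Int) ≤ 3 by norm_num), ← pow_succ']
    have hmid : n % 3 ^ (k + 1 + 1) / 3 = n / 3 % 3 ^ (k + 1) := by
      have := mid_digit n (3 ^ (k + 1)) (by positivity)
      rwa [← pow_succ'] at this
    have hlast : n % 3 ^ (k + 1 + 1) % 3 = n % 3 :=
      Int.emod_emod_of_dvd n (dvd_pow_self 3 (by omega))
    rw [ih f g (n % 3 ^ (k + 1 + 1)) (Int.emod_nonneg n (by positivity)) (by omega) (by omega)]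
    rw [hhead, hmid, hlast]
    simp

-- with the right power, B's extraction loop produces exactly A's recursion
theorem digGo_eq_toTernaryGo : ∀ (k : Nat), ∀ (f g : Nat) (n : Int),
    3 ^ k ≤ n → n < 3 ^ (k + 1) → k + 1 < f → n.toNat < g →
    digGo f n (3 ^ k) = toTernaryGo g n := by
  intro k
  induction k with
  | zero =>
    intro f g n hlo hhi hf hg
    simp only [pow_zero] at hlo; simp only [zero_add, pow_one] at hhi
    obtain ⟨f, rfl⟩ : ∃ f', f = f' + 1 := ⟨f - 1, by omega⟩
    obtain ⟨g, rfl⟩ : ∃ g', g = g' + 1 := ⟨g - 1, by omega⟩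
    rw [pow_zero, digGo_one, toTernaryGo]
    have hfd : PySem.Int.floordiv n 3 = 0 := by
      rw [PySem.Int.floordiv_eq_ediv_of_pos (by norm_num)]
      omega
    rw [if_neg (by omega : ¬ n = 0), if_pos hfd]
    have hmd : PySem.Int.mod n 3 = n := by
      rw [PySem.Int.mod_eq_emod_of_pos (by norm_num)]
      omega
    rw [hmd]
  | succ k ih =>
    intro f g n hlo hhi hf hg
    have h3 : (3:Int) ≤ 3 ^ (k + 1) := by
      calc (3:Int) = 3 ^ 1 := (pow_one 3).symm
        _ ≤ 3 ^ (k + 1) := pow_le_pow_right₀ (by norm_num) (by omega)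
    have hn3 : 3 ≤ n := le_trans h3 hlo
    have hde : 3 * (n / 3) + n % 3 = n := by omega
    have hm0 : 0 ≤ n % 3 := Int.emod_nonneg n (by norm_num)
    have hm3 : n % 3 < 3 := Int.emod_lt_of_pos n (by norm_num)
    rw [digGo_step k f f n (by omega) (by omega) (by omega)]
    obtain ⟨g, rfl⟩ : ∃ g', g = g' + 1 := ⟨g - 1, by omega⟩
    have hdivlo : 3 ^ k ≤ n / 3 := by
      rw [Int.le_ediv_iff_mul_le (by norm_num : (0:Int) < 3)]
      calc 3 ^ k * 3 = 3 ^ (k + 1) := (pow_succ 3 k).symm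
        _ ≤ n := hlo
    have hdivhi : n / 3 < 3 ^ (k + 1) := by
      rw [Int.ediv_lt_iff_lt_mul (by norm_num : (0:Int) < 3)]
      calc n < 3 ^ (k + 1 + 1) := hhi
        _ = 3 ^ (k + 1) * 3 := pow_succ 3 (k + 1)
    rw [ih f g (n / 3) hdivlo hdivhi (by omega) (by omega)]
    rw [toTernaryGo]
    have hfd : PySem.Int.floordiv n 3 = n / 3 := by
      rw [PySem.Int.floordiv_eq_ediv_of_pos (by norm_num)]
    have hmd : PySem.Int.mod n 3 = n % 3 := by
      rw [PySem.Int.mod_eq_emod_of_pos (by norm_num)]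
    rw [if_neg (by omega : ¬ n = 0), hfd, hmd,
      if_neg (by omega : ¬ n / 3 = 0)]

-- ===== VERDICT (by name: the statement is the Claim_ definition above) =====
theorem toTernary_spec : Claim_equal_toTernary := by
  intro n _ hpre
  unfold Pre_toTernary at hpre
  unfold Spec_toTernary toTernary toTernary_alt
  by_cases h0 : n = 0
  · subst h0; decide
  · have hn1 : 1 ≤ n := by omega
    have hbig : n < 1 * 3 ^ (n.toNat + 1) := by
      have h1 : n.toNat < 3 ^ n.toNat := Nat.lt_pow_self (by norm_num)
      have h2 : (3:Nat) ^ n.toNat ≤ 3 ^ (n.toNat + 1) :=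
        Nat.pow_le_pow_right (by norm_num) (Nat.le_succ _)
      have h3 : (n.toNat : Int) < ((3:Nat) ^ (n.toNat + 1) : Nat) := by
        exact_mod_cast lt_of_lt_of_le h1 h2
      rw [one_mul]
      calc n = (n.toNat : Int) := by omega
        _ < ((3:Nat) ^ (n.toNat + 1) : Nat) := h3
        _ = (3:Int) ^ (n.toNat + 1) := by push_cast; ring
    obtain ⟨k, hk, hlo, hhi⟩ := powGo_spec (n.toNat + 1) 1 n (by norm_num) hn1 hbig
    rw [one_mul] at hk hlo hhi
    have hkn : k < 3 ^ k := Nat.lt_pow_self (by norm_num)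
    have hk3 : ((3:Nat) ^ k : Nat) = ((3:Int) ^ k : Int) := by push_cast; ring
    have hksm : (k : Int) ≤ n := by
      calc (k : Int) ≤ ((3:Nat) ^ k : Nat) := by exact_mod_cast Nat.le_of_lt hkn
        _ = (3:Int) ^ k := hk3
        _ ≤ n := hlo
    rw [hk]
    exact (digGo_eq_toTernaryGo k (n.toNat + 2) (n.toNat + 1) n hlo hhi (by omega) (by omega)).symm
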